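-- pv_equiv track=rewrite | github.com/stuentofe/workbook_api | api/ordering.py | get_valid_4_chunk_combinations
-- ===== SOURCE A (Python) =====
-- from typing import List, Dict
--
-- def get_valid_4_chunk_combinations(n: int) -> List[List[int]]:
--     result = []
--
--     def dfs(current, total):
--         if len(current) == 4 and total == n:
--             result.append(current[:])
--             return
--         if len(current) >= 4 or total >= n:
--             return
--         max_chunk = 3 if n >= 9 else 2
--         for i in range(1, max_chunk + 1):
--             dfs(current + [i], total + i)
--
--     dfs([], 0)
--     return result
-- ===== SOURCE B (Python) =====
-- from typing import List
--
-- def get_valid_4_chunk_combinations(n: int) -> List[List[int]]: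
--     m = 3 if n >= 9 else 2
--     r = range(1, m + 1)
--     return [[a, b, c, d]
--             for a in r for b in r for c in r for d in r
--             if a + b + c + d == n]
-- ===== Notes on version B (the rewrite author's own statement) =====
-- stated objective: idiomatic
-- what changed: Replaced the pruned recursive DFS with accumulator mutation by an exhaustive generate-and-filter comprehension over the full fourfold product of range(1, max_chunk+1), keeping tuples whose sum is n.
import Mathlib
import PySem

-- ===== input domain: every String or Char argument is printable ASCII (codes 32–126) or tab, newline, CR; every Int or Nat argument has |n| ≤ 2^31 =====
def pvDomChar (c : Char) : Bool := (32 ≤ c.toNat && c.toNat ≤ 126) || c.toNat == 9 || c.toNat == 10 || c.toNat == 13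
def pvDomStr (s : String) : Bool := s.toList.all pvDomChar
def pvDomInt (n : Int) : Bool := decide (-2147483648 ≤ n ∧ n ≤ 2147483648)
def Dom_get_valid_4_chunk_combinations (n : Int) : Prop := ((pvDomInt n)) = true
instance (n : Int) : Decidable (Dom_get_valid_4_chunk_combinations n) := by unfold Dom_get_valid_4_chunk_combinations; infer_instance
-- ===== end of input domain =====

-- B replaces A's pruned recursive DFS with a generate-and-filter comprehension over the full product space (objective: idiomatic).
-- ===== PORT A =====
-- dfs(current, total): recursion is on 4 - len(current); 'result' is threaded as an accumulator.
-- fuel is only a totality device: each call appends one element, len(current) ≤ 4 always,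
-- so with initial fuel 5 the 0-fuel branch is never reached.
def pvDfsA (n : Int) (fuel : Nat) (current : List Int) (total : Int)
    (result : List (List Int)) : List (List Int) :=
  match fuel with
  | 0 => result
  | fuel + 1 =>
    if current.length = 4 ∧ total = n then result ++ [current]
    else if 4 ≤ current.length ∨ n ≤ total then result
    else
      let maxChunk : Int := if 9 ≤ n then 3 else 2
      (PySem.List.pyRange 1 (maxChunk + 1) 1).foldl
        (fun res i => pvDfsA n fuel (current ++ [i]) (total + i) res) result

def get_valid_4_chunk_combinations (n : Int) : List (List Int) :=
  pvDfsA n 5 [] 0 []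

-- ===== PORT B =====
def get_valid_4_chunk_combinations_alt (n : Int) : List (List Int) :=
  let m : Int := if 9 ≤ n then 3 else 2
  let r := PySem.List.pyRange 1 (m + 1) 1
  r.flatMap fun a => r.flatMap fun b => r.flatMap fun c => r.flatMap fun d =>
    if a + b + c + d = n then [[a, b, c, d]] else []

-- ===== PRECONDITION & SPEC =====
def Spec_get_valid_4_chunk_combinations (n : Int) (out : List (List Int)) : Prop := out = get_valid_4_chunk_combinations_alt n
instance (n : Int) (out : List (List Int)) : Decidable (Spec_get_valid_4_chunk_combinations n out) := by unfold Spec_get_valid_4_chunk_combinations; infer_instance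

-- ===== CLAIM (what is proved, stated in full; the proofs are below) =====
def Claim_equal_get_valid_4_chunk_combinations : Prop := ∀ (n : Int), Dom_get_valid_4_chunk_combinations n → Spec_get_valid_4_chunk_combinations n (get_valid_4_chunk_combinations n)

-- ===== LEMMAS AND PROOFS =====

-- ===== VERDICT (by name: the statement is the Claim_ definition above) =====
lemma pvB_nil_of_out (n : Int) (h : n ≤ 0 ∨ 13 ≤ n) :
    get_valid_4_chunk_combinations_alt n = [] := by
  unfold get_valid_4_chunk_combinations_alt
  simp only [List.flatMap_eq_nil_iff]
  intro a ha b hb c hc d hd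
  have hm : (if 9 ≤ n then (3:Int) else 2) ≤ 3 := by split <;> norm_num
  rw [PySem.List.mem_pyRange_one] at ha hb hc hd
  rw [if_neg (by omega)]

lemma pvDfsA_prune (fuel : Nat) (n : Int) (current : List Int) (total : Int)
    (res : List (List Int)) (hlen : current.length ≤ 4) (h9 : (9 : Int) ≤ n)
    (h : total + 3 * ((4 : Int) - current.length) < n) :
    pvDfsA n fuel current total res = res := by
  induction fuel generalizing current total res with
  | zero => rfl
  | succ fuel ih =>
    by_cases h4 : current.length = 4
    · unfold pvDfsA
      rw [if_neg (by rw [h4] at h ⊢; simp at h ⊢; omega), if_pos (by left; omega)]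
    · have hlt : current.length < 4 := by omega
      unfold pvDfsA
      rw [if_neg (by intro hand; omega), if_neg (by omega)]
      have hmc : (if 9 ≤ n then (3:Int) else 2) = 3 := if_pos h9
      simp only [hmc]
      have hr : PySem.List.pyRange 1 (3 + 1) 1 = [1, 2, 3] := by decide
      rw [hr]
      simp only [List.foldl_cons, List.foldl_nil]
      have step : ∀ (i : Int) (r : List (List Int)), 1 ≤ i → i ≤ 3 →
          pvDfsA n fuel (current ++ [i]) (total + i) r = r := by
        intro i r h1 h3
        apply ih _ _ _ (by simp; omega) ?_
        simp only [List.length_append, List.length_cons, List.length_nil]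
        push_cast
        omega
      rw [step 1 _ (by norm_num) (by norm_num),
          step 2 _ (by norm_num) (by norm_num),
          step 3 _ (by norm_num) (by norm_num)]

set_option maxRecDepth 8000 in
set_option maxHeartbeats 1000000 in
theorem get_valid_4_chunk_combinations_spec : Claim_equal_get_valid_4_chunk_combinations := by
  intro n _
  unfold Spec_get_valid_4_chunk_combinations
  by_cases h0 : n ≤ 0
  · rw [pvB_nil_of_out n (Or.inl h0)]
    unfold get_valid_4_chunk_combinations pvDfsA
    rw [if_neg (by simp), if_pos (by right; simpa using h0)]
  · by_cases h13 : (13 : Int) ≤ n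
    · rw [pvB_nil_of_out n (Or.inr h13)]
      unfold get_valid_4_chunk_combinations
      apply pvDfsA_prune 5 n [] 0 [] (by simp) (by omega)
      simp; omega
    · have h1 : (1 : Int) ≤ n := by omega
      have h12 : n ≤ (12 : Int) := by omega
      interval_cases n <;> decide
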